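-- pv_equiv track=rewrite | github.com/kbonnet001/shoulder | neural_networks/plot_pareto_front.py | find_points_front_pareto
-- ===== SOURCE A (Python) =====
-- def find_points_front_pareto(num_points, x_axis, y_axis):
--     """
--     Identifies indices of points on the Pareto front from given x and y coordinates.
--
--     Args:
--         num_points (int): The number of points to evaluate.
--         x_axis (list): List of x-coordinates for the points.
--         y_axis (list): List of y-coordinates for the points.
--
--     Returns:
--         list: Indices of points that are part of the Pareto front.
--     """
--     pareto_indices = []  # List to store indices of non-dominated points
--
--     # Iterate over each point to check if it is dominated by any other point
--     for i in range(num_points):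
--         dominated = False  # Flag to check if the current point is dominated
--
--         # Compare the current point with all other points
--         for j in range(num_points):
--             # Check if point j dominates point i
--             if (x_axis[j] <= x_axis[i] and y_axis[j] <= y_axis[i]) and (x_axis[j] < x_axis[i] or y_axis[j] < y_axis[i]):
--                 dominated = True  # Point i is dominated, no need to check further
--                 break
--
--         # If not dominated, add the index of the current point to the Pareto front
--         if not dominated:
--             pareto_indices.append(i)
--
--     return pareto_indices  # Return the indices of the Pareto front points
-- ===== SOURCE B (Python) =====
-- def find_points_front_pareto(num_points, x_axis, y_axis):
--     """
--     Identifies indices of points on the Pareto front from given x and y coordinates.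
--
--     Instead of comparing every pair of points, group the points by x-coordinate,
--     record the minimal y per x, and a running-prefix minimum of y over all
--     strictly smaller x values; each point is then tested in O(1):
--     it is dominated iff some point has a strictly smaller x and a y no larger,
--     or the same x and a strictly smaller y.
--     """
--     # minimal y among the points sharing each x value
--     min_at = {}
--     for i in range(num_points):
--         x, y = x_axis[i], y_axis[i]
--         m = min_at.get(x)
--         min_at[x] = y if m is None or y < m else m
--
--     # before[x] = minimal y among all points with x-coordinate strictly below x
--     before = {}
--     running = None
--     for x in sorted(min_at):
--         before[x] = running
--         m = min_at[x]
--         running = m if running is None or m < running else running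
--
--     pareto_indices = []
--     for i in range(num_points):
--         x, y = x_axis[i], y_axis[i]
--         b = before[x]
--         if (b is None or y < b) and y <= min_at[x]:
--             pareto_indices.append(i)
--     return pareto_indices
-- ===== Notes on version B (the rewrite author's own statement) =====
-- stated objective: faster
-- what changed: Replaces the all-pairs domination scan with one pass that records the minimal y per x-value in a dict plus a prefix minimum of y over strictly smaller x, so each point is classified by two O(1) lookups after an O(n log n) sort of the distinct x values.
import Mathlib
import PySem

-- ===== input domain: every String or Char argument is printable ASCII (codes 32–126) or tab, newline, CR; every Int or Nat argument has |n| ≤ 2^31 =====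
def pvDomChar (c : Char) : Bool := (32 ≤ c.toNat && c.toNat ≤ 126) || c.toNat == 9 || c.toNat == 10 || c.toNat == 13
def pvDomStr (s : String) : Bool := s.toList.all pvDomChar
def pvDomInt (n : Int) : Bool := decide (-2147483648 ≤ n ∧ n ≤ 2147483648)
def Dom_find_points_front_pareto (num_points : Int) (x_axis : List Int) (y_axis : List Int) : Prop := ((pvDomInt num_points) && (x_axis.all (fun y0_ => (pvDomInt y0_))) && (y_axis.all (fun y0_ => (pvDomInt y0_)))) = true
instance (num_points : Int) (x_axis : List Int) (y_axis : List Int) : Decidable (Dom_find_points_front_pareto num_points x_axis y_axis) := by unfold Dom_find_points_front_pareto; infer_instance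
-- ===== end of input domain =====

-- B replaces A's all-pairs domination scan by a per-x minimum dict plus a prefix
-- minimum over strictly smaller x (objective: faster, O(n log n) vs O(n^2)).

-- ===== PORT A =====
-- inner 'for j in range(num_points)' with its break: first j that dominates stops the scan
def pvA_domLoop (x_axis y_axis : List Int) (xi yi : Int) : List Int → Bool
  | [] => false
  | j :: rest =>
    let xj := PySem.List.pyGetD x_axis j 0
    let yj := PySem.List.pyGetD y_axis j 0
    if (xj ≤ xi ∧ yj ≤ yi) ∧ (xj < xi ∨ yj < yi) then true
    else pvA_domLoop x_axis y_axis xi yi rest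

-- list indexing is pyGetD with default 0: safe under Pre_ (indices of range(num_points) are in range)
def find_points_front_pareto (num_points : Int) (x_axis : List Int) (y_axis : List Int) : List Int :=
  (PySem.List.pyRange 0 num_points 1).foldl
    (fun pareto_indices i =>
      let xi := PySem.List.pyGetD x_axis i 0
      let yi := PySem.List.pyGetD y_axis i 0
      let dominated := pvA_domLoop x_axis y_axis xi yi (PySem.List.pyRange 0 num_points 1)
      if dominated then pareto_indices else pareto_indices ++ [i]) []

-- ===== PORT B =====
-- min_at: minimal y among the points sharing each x value (dict built in one pass)
def pvB_minAt (num_points : Int) (x_axis y_axis : List Int) : PySem.Dict Int Int :=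
  (PySem.List.pyRange 0 num_points 1).foldl
    (fun d i =>
      let x := PySem.List.pyGetD x_axis i 0
      let y := PySem.List.pyGetD y_axis i 0
      let m := d.get? x
      d.insert x (match m with | none => y | some m => if y < m then y else m))
    PySem.Dict.empty

-- before[x] = minimal y among all points with x-coordinate strictly below x
def pvB_before (minAt : PySem.Dict Int Int) : PySem.Dict Int (Option Int) :=
  ((PySem.List.sorted minAt.keys (fun k => k) false).foldl
    (fun (st : PySem.Dict Int (Option Int) × Option Int) x =>
      let before := st.1.insert x st.2
      let m := minAt.getD x 0
      let running := match st.2 with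
        | none => some m
        | some r => if m < r then some m else some r
      (before, running))
    (PySem.Dict.empty, none)).1

def find_points_front_pareto_alt (num_points : Int) (x_axis : List Int) (y_axis : List Int) : List Int :=
  let minAt := pvB_minAt num_points x_axis y_axis
  let before := pvB_before minAt
  (PySem.List.pyRange 0 num_points 1).foldl
    (fun pareto_indices i =>
      let x := PySem.List.pyGetD x_axis i 0
      let y := PySem.List.pyGetD y_axis i 0
      let b := before.getD x none
      if ((match b with | none => true | some r => decide (y < r)) && decide (y ≤ minAt.getD x 0)) = true
      then pareto_indices ++ [i] else pareto_indices) []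

-- ===== PRECONDITION & SPEC =====
-- Pre_: Python A (and B) index x_axis[i], y_axis[i] for every 0 ≤ i < num_points, so
-- num_points must not exceed either length (IndexError otherwise); num_points ≤ 0 is fine (empty range).
def Pre_find_points_front_pareto (num_points : Int) (x_axis : List Int) (y_axis : List Int) : Prop :=
  num_points ≤ (x_axis.length : Int) ∧ num_points ≤ (y_axis.length : Int)
instance (num_points : Int) (x_axis : List Int) (y_axis : List Int) : Decidable (Pre_find_points_front_pareto num_points x_axis y_axis) := by unfold Pre_find_points_front_pareto; infer_instance

def pvWitness_find_points_front_pareto : Int × List Int × List Int := (3, [0, 1, 2], [1, 0, 2])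

def Spec_find_points_front_pareto (num_points : Int) (x_axis : List Int) (y_axis : List Int) (out : List Int) : Prop := out = find_points_front_pareto_alt num_points x_axis y_axis
instance (num_points : Int) (x_axis : List Int) (y_axis : List Int) (out : List Int) : Decidable (Spec_find_points_front_pareto num_points x_axis y_axis out) := by unfold Spec_find_points_front_pareto; infer_instance

-- ===== CLAIM (what is proved, stated in full; the proofs are below) =====
def Claim_equal_find_points_front_pareto : Prop := ∀ (num_points : Int) (x_axis : List Int) (y_axis : List Int), Dom_find_points_front_pareto num_points x_axis y_axis → Pre_find_points_front_pareto num_points x_axis y_axis → Spec_find_points_front_pareto num_points x_axis y_axis (find_points_front_pareto num_points x_axis y_axis)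


-- ===== LEMMAS AND PROOFS =====

-- abbreviation used only by the proofs: the step of B's per-x minimum fold
def pvGrpStep (xs ys : List Int) (x : Int) (o : Option Int) (j : Int) : Option Int :=
  if PySem.List.pyGetD xs j 0 = x then
    some (match o with
      | none => PySem.List.pyGetD ys j 0
      | some m => if PySem.List.pyGetD ys j 0 < m then PySem.List.pyGetD ys j 0 else m)
  else o

def pvGrp (xs ys : List Int) (x : Int) (L : List Int) (o : Option Int) : Option Int :=
  L.foldl (pvGrpStep xs ys x) o

-- the step of B's running prefix minimum
def pvRunStep (minAt : PySem.Dict Int Int) (r : Option Int) (k : Int) : Option Int :=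
  match r with
  | none => some (minAt.getD k 0)
  | some r' => if minAt.getD k 0 < r' then some (minAt.getD k 0) else some r'

def pvRun (minAt : PySem.Dict Int Int) (o : Option Int) (ks : List Int) : Option Int :=
  ks.foldl (pvRunStep minAt) o

def pvBuild (minAt : PySem.Dict Int Int) (st : PySem.Dict Int (Option Int) × Option Int)
    (ks : List Int) : PySem.Dict Int (Option Int) × Option Int :=
  ks.foldl (fun st x => (st.1.insert x st.2, pvRunStep minAt st.2 x)) st

lemma pvA_domLoop_eq_any (xs ys : List Int) (xi yi : Int) (L : List Int) :
    pvA_domLoop xs ys xi yi L =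
      L.any (fun j => decide ((PySem.List.pyGetD xs j 0 ≤ xi ∧ PySem.List.pyGetD ys j 0 ≤ yi) ∧
        (PySem.List.pyGetD xs j 0 < xi ∨ PySem.List.pyGetD ys j 0 < yi))) := by
  induction L with
  | nil => rfl
  | cons j rest ih =>
    simp only [pvA_domLoop, List.any_cons]
    split_ifs with h <;> simp [h, ih]

lemma pvB_minAt_get? (xs ys : List Int) (x : Int) : ∀ (L : List Int) (d : PySem.Dict Int Int),
    (L.foldl (fun d i =>
      let xc := PySem.List.pyGetD xs i 0
      let y := PySem.List.pyGetD ys i 0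
      let m := d.get? xc
      d.insert xc (match m with | none => y | some m => if y < m then y else m)) d).get? x
    = pvGrp xs ys x L (d.get? x) := by
  intro L
  induction L with
  | nil => intro d; rfl
  | cons j L ih =>
    intro d
    simp only [List.foldl_cons]
    rw [ih]
    have hstep : (d.insert (PySem.List.pyGetD xs j 0)
        (match d.get? (PySem.List.pyGetD xs j 0) with
          | none => PySem.List.pyGetD ys j 0
          | some m => if PySem.List.pyGetD ys j 0 < m then PySem.List.pyGetD ys j 0 else m)).get? x
        = pvGrpStep xs ys x (d.get? x) j := by
      rw [PySem.Dict.get?_insert]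
      by_cases h : PySem.List.pyGetD xs j 0 = x
      · simp [pvGrpStep, h]
      · have hne : x ≠ PySem.List.pyGetD xs j 0 := fun hh => h hh.symm
        simp [pvGrpStep, h, hne]
    rw [hstep]
    rfl

lemma pvGrp_none_iff (xs ys : List Int) (x : Int) : ∀ (L : List Int) (o : Option Int),
    pvGrp xs ys x L o = none ↔ (o = none ∧ ∀ j ∈ L, PySem.List.pyGetD xs j 0 ≠ x) := by
  intro L
  induction L with
  | nil => intro o; simp [pvGrp]
  | cons j L ih =>
    intro o
    have : pvGrp xs ys x (j :: L) o = pvGrp xs ys x L (pvGrpStep xs ys x o j) := rfl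
    rw [this, ih]
    by_cases h : PySem.List.pyGetD xs j 0 = x
    · simp [pvGrpStep, h]
    · simp only [pvGrpStep, if_neg h, List.mem_cons]
      constructor
      · rintro ⟨ho, hall⟩
        exact ⟨ho, fun k hk => hk.elim (fun e => e ▸ h) (hall k)⟩
      · rintro ⟨ho, hall⟩
        exact ⟨ho, fun k hk => hall k (Or.inr hk)⟩

lemma pvGrp_some (xs ys : List Int) (x : Int) : ∀ (L : List Int) (o : Option Int) (m : Int),
    pvGrp xs ys x L o = some m →
    ((o = some m ∨ ∃ j ∈ L, PySem.List.pyGetD xs j 0 = x ∧ PySem.List.pyGetD ys j 0 = m) ∧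
     (∀ r, o = some r → m ≤ r) ∧
     (∀ j ∈ L, PySem.List.pyGetD xs j 0 = x → m ≤ PySem.List.pyGetD ys j 0)) := by
  intro L
  induction L with
  | nil =>
    intro o m h
    simp [pvGrp] at h
    exact ⟨Or.inl h, fun r hr => by simp [h] at hr; omega, by simp⟩
  | cons j L ih =>
    intro o m h
    have hrec : pvGrp xs ys x L (pvGrpStep xs ys x o j) = some m := h
    obtain ⟨h1, h2, h3⟩ := ih (pvGrpStep xs ys x o j) m hrec
    by_cases hx : PySem.List.pyGetD xs j 0 = x
    · -- the step produced some v with m ≤ v, v ≤ Y j and v ≤ any old value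
      have hv : ∃ v, pvGrpStep xs ys x o j = some v ∧ v ≤ PySem.List.pyGetD ys j 0 ∧
          (∀ r, o = some r → v ≤ r) ∧ (o = none → v = PySem.List.pyGetD ys j 0) ∧
          (∀ r, o = some r → v = PySem.List.pyGetD ys j 0 ∨ v = r) := by
        cases o with
        | none => exact ⟨PySem.List.pyGetD ys j 0, by simp [pvGrpStep, hx], le_refl _, by simp, fun _ => rfl, by simp⟩
        | some m0 =>
          refine ⟨if PySem.List.pyGetD ys j 0 < m0 then PySem.List.pyGetD ys j 0 else m0,
            by simp [pvGrpStep, hx], ?_, ?_, by simp, ?_⟩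
          · split_ifs <;> omega
          · intro r hr; cases hr; split_ifs <;> omega
          · intro r hr; cases hr; split_ifs <;> simp
      obtain ⟨v, hveq, hvy, hvold, hvnone, hvcases⟩ := hv
      have hmv : m ≤ v := h2 v hveq
      refine ⟨?_, ?_, ?_⟩
      · rcases h1 with h1 | ⟨k, hk, hkx, hky⟩
        · rw [hveq] at h1
          cases h1
          -- m = v
          cases o with
          | none => exact Or.inr ⟨j, List.mem_cons_self .., hx, (hvnone rfl).symm ▸ rfl⟩
          | some m0 =>
            rcases hvcases m0 rfl with hc | hc
            · exact Or.inr ⟨j, List.mem_cons_self .., hx, hc.symm⟩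
            · exact Or.inl (by rw [hc])
        · exact Or.inr ⟨k, List.mem_cons_of_mem _ hk, hkx, hky⟩
      · intro r hr
        exact le_trans hmv (hvold r hr)
      · intro k hk hkx2
        rcases List.mem_cons.mp hk with rfl | hk2
        · exact le_trans hmv hvy
        · exact h3 k hk2 hkx2
    · -- step leaves o unchanged
      have bstep : pvGrpStep xs ys x o j = o := by simp [pvGrpStep, hx]
      rw [bstep] at h1 h2
      refine ⟨?_, h2, ?_⟩
      · rcases h1 with h1 | ⟨k, hk, hkx, hky⟩
        · exact Or.inl h1
        · exact Or.inr ⟨k, List.mem_cons_of_mem _ hk, hkx, hky⟩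
      · intro k hk hkx2
        rcases List.mem_cons.mp hk with rfl | hk2
        · exact absurd hkx2 hx
        · exact h3 k hk2 hkx2

lemma pvRun_none_iff (minAt : PySem.Dict Int Int) : ∀ (ks : List Int) (o : Option Int),
    pvRun minAt o ks = none ↔ (o = none ∧ ks = []) := by
  intro ks
  induction ks with
  | nil => intro o; simp [pvRun]
  | cons k ks ih =>
    intro o
    have : pvRun minAt o (k :: ks) = pvRun minAt (pvRunStep minAt o k) ks := rfl
    rw [this, ih]
    cases o <;> simp [pvRunStep] <;> split_ifs <;> simp

lemma pvRun_some (minAt : PySem.Dict Int Int) : ∀ (ks : List Int) (o : Option Int) (m : Int),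
    pvRun minAt o ks = some m →
    ((o = some m ∨ ∃ k ∈ ks, minAt.getD k 0 = m) ∧
     (∀ r, o = some r → m ≤ r) ∧
     (∀ k ∈ ks, m ≤ minAt.getD k 0)) := by
  intro ks
  induction ks with
  | nil =>
    intro o m h
    simp [pvRun] at h
    exact ⟨Or.inl h, fun r hr => by simp [h] at hr; omega, by simp⟩
  | cons k ks ih =>
    intro o m h
    obtain ⟨h1, h2, h3⟩ := ih (pvRunStep minAt o k) m h
    have hv : ∃ v, pvRunStep minAt o k = some v ∧ v ≤ minAt.getD k 0 ∧
        (∀ r, o = some r → v ≤ r) ∧ (o = none → v = minAt.getD k 0) ∧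
        (∀ r, o = some r → v = minAt.getD k 0 ∨ v = r) := by
      cases o with
      | none => exact ⟨minAt.getD k 0, rfl, le_refl _, by simp, by simp, by simp⟩
      | some m0 =>
        refine ⟨if minAt.getD k 0 < m0 then minAt.getD k 0 else m0, ?_, ?_, ?_, by simp, ?_⟩
        · simp [pvRunStep]; split_ifs <;> simp
        · split_ifs <;> omega
        · intro r hr; cases hr; split_ifs <;> omega
        · intro r hr; cases hr; split_ifs <;> simp
    obtain ⟨v, hveq, hvk, hvold, hvnone, hvcases⟩ := hv
    have hmv : m ≤ v := h2 v hveq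
    refine ⟨?_, ?_, ?_⟩
    · rcases h1 with h1 | ⟨k', hk', hk'v⟩
      · rw [hveq] at h1
        cases h1
        cases o with
        | none => exact Or.inr ⟨k, List.mem_cons_self .., (hvnone rfl).symm⟩
        | some m0 =>
          rcases hvcases m0 rfl with hc | hc
          · exact Or.inr ⟨k, List.mem_cons_self .., hc.symm⟩
          · exact Or.inl (by rw [hc])
      · exact Or.inr ⟨k', List.mem_cons_of_mem _ hk', hk'v⟩
    · intro r hr
      exact le_trans hmv (hvold r hr)
    · intro k' hk'
      rcases List.mem_cons.mp hk' with rfl | hk2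
      · exact le_trans hmv hvk
      · exact h3 k' hk2

lemma pvBuild_get?_not_mem (minAt : PySem.Dict Int Int) (x : Int) :
    ∀ (ks : List Int) (st : PySem.Dict Int (Option Int) × Option Int), x ∉ ks →
    (pvBuild minAt st ks).1.get? x = st.1.get? x := by
  intro ks
  induction ks with
  | nil => intro st _; rfl
  | cons k ks ih =>
    intro st hx
    have hne : x ≠ k := fun h => hx (h ▸ List.mem_cons_self ..)
    have : pvBuild minAt st (k :: ks) = pvBuild minAt (st.1.insert k st.2, pvRunStep minAt st.2 k) ks := rfl
    rw [this, ih _ (fun h => hx (List.mem_cons_of_mem _ h))]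
    exact PySem.Dict.get?_insert_of_ne _ _ hne

lemma pvBuild_get?_mem (minAt : PySem.Dict Int Int) (x : Int) :
    ∀ (ks : List Int) (st : PySem.Dict Int (Option Int) × Option Int), x ∈ ks →
    ks.Pairwise (· < ·) →
    (pvBuild minAt st ks).1.get? x =
      some (pvRun minAt st.2 (ks.filter (fun k => decide (k < x)))) := by
  intro ks
  induction ks with
  | nil => intro st h; cases h
  | cons k ks ih =>
    intro st hx hp
    have hklt : ∀ z ∈ ks, k < z := (List.pairwise_cons.mp hp).1
    have hp2 : ks.Pairwise (· < ·) := (List.pairwise_cons.mp hp).2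
    have hstep : pvBuild minAt st (k :: ks) = pvBuild minAt (st.1.insert k st.2, pvRunStep minAt st.2 k) ks := rfl
    by_cases hkx : k = x
    · subst hkx
      have hnx : k ∉ ks := fun h => absurd (hklt k h) (lt_irrefl k)
      have hfilt : (k :: ks).filter (fun z => decide (z < k)) = [] := by
        rw [List.filter_eq_nil_iff]
        intro z hz
        rcases List.mem_cons.mp hz with rfl | hz2
        · simp
        · have := hklt z hz2; simp; omega
      rw [hstep, pvBuild_get?_not_mem minAt k ks _ hnx, hfilt]
      simpa [pvRun] using PySem.Dict.get?_insert_self st.1 k st.2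
    · have hxks : x ∈ ks := (List.mem_cons.mp hx).resolve_left (fun h => hkx h.symm)
      have hkltx : k < x := hklt x hxks
      have hfilt : (k :: ks).filter (fun z => decide (z < x)) =
          k :: ks.filter (fun z => decide (z < x)) := by
        rw [List.filter_cons_of_pos (by simpa using hkltx)]
      rw [hstep, ih _ hxks hp2, hfilt]
      rfl

lemma pvB_minAt_keys (num_points : Int) (xs ys : List Int) :
    (pvB_minAt num_points xs ys).keys =
      PySem.Set.ofList ((PySem.List.pyRange 0 num_points 1).map (fun i => PySem.List.pyGetD xs i 0)) := by
  exact (PySem.Dict.keys_foldl_insert_key (PySem.List.pyRange 0 num_points 1)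
      (fun i => PySem.List.pyGetD xs i 0)
      (fun d i => match d.get? (PySem.List.pyGetD xs i 0) with
        | none => PySem.List.pyGetD ys i 0
        | some m => if PySem.List.pyGetD ys i 0 < m then PySem.List.pyGetD ys i 0 else m)
      PySem.Dict.empty).trans (by rw [PySem.Dict.keys_empty, PySem.Set.update_nil_left])


lemma pvB_before_def (minAt : PySem.Dict Int Int) :
    pvB_before minAt =
      (pvBuild minAt (PySem.Dict.empty, none) (PySem.List.sorted minAt.keys (fun k => k) false)).1 := rfl

lemma pv_find_A_eq_filter (num_points : Int) (xs ys : List Int) :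
    find_points_front_pareto num_points xs ys =
      (PySem.List.pyRange 0 num_points 1).filter
        (fun i => !pvA_domLoop xs ys (PySem.List.pyGetD xs i 0) (PySem.List.pyGetD ys i 0)
            (PySem.List.pyRange 0 num_points 1)) := by
  unfold find_points_front_pareto
  have hfun : (fun (acc : List Int) (i : Int) =>
      let xi := PySem.List.pyGetD xs i 0
      let yi := PySem.List.pyGetD ys i 0
      let dominated := pvA_domLoop xs ys xi yi (PySem.List.pyRange 0 num_points 1)
      if dominated then acc else acc ++ [i]) =
      (fun (acc : List Int) (i : Int) =>
        if (!pvA_domLoop xs ys (PySem.List.pyGetD xs i 0) (PySem.List.pyGetD ys i 0)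
            (PySem.List.pyRange 0 num_points 1)) = true then acc ++ [id i] else acc) := by
    funext acc i
    by_cases h : pvA_domLoop xs ys (PySem.List.pyGetD xs i 0) (PySem.List.pyGetD ys i 0)
        (PySem.List.pyRange 0 num_points 1) = true <;> simp [h]
  rw [hfun, PySem.List.foldl_append_if]
  simp

lemma pv_find_B_eq_filter (num_points : Int) (xs ys : List Int) :
    find_points_front_pareto_alt num_points xs ys =
      (PySem.List.pyRange 0 num_points 1).filter
        (fun i =>
          (match (pvB_before (pvB_minAt num_points xs ys)).getD (PySem.List.pyGetD xs i 0) none with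
            | none => true
            | some r => decide (PySem.List.pyGetD ys i 0 < r)) &&
          decide (PySem.List.pyGetD ys i 0 ≤ (pvB_minAt num_points xs ys).getD (PySem.List.pyGetD xs i 0) 0)) := by
  unfold find_points_front_pareto_alt
  show List.foldl
      (fun (pareto_indices : List Int) (i : Int) =>
        if ((match (pvB_before (pvB_minAt num_points xs ys)).getD (PySem.List.pyGetD xs i 0) none with
            | none => true
            | some r => decide (PySem.List.pyGetD ys i 0 < r)) &&
          decide (PySem.List.pyGetD ys i 0 ≤ (pvB_minAt num_points xs ys).getD (PySem.List.pyGetD xs i 0) 0)) = true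
        then pareto_indices ++ [id i] else pareto_indices)
      [] (PySem.List.pyRange 0 num_points 1) = _
  rw [PySem.List.foldl_append_if]
  simp

lemma pv_pointwise (num_points : Int) (xs ys : List Int) (i : Int)
    (hi : i ∈ PySem.List.pyRange 0 num_points 1) :
    (!pvA_domLoop xs ys (PySem.List.pyGetD xs i 0) (PySem.List.pyGetD ys i 0)
        (PySem.List.pyRange 0 num_points 1)) =
    ((match (pvB_before (pvB_minAt num_points xs ys)).getD (PySem.List.pyGetD xs i 0) none with
       | none => true
       | some r => decide (PySem.List.pyGetD ys i 0 < r)) &&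
     decide (PySem.List.pyGetD ys i 0 ≤ (pvB_minAt num_points xs ys).getD (PySem.List.pyGetD xs i 0) 0)) := by
  -- notation
  have hget : ∀ z : Int, (pvB_minAt num_points xs ys).get? z =
      pvGrp xs ys z (PySem.List.pyRange 0 num_points 1) none := by
    intro z
    unfold pvB_minAt
    rw [pvB_minAt_get? xs ys z (PySem.List.pyRange 0 num_points 1) PySem.Dict.empty,
      PySem.Dict.get?_empty]
  have hkeys_iff : ∀ z : Int, z ∈ (pvB_minAt num_points xs ys).keys ↔
      ∃ j ∈ PySem.List.pyRange 0 num_points 1, PySem.List.pyGetD xs j 0 = z := by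
    intro z
    rw [pvB_minAt_keys, PySem.Set.mem_ofList, List.mem_map]
  -- x, y of point i
  have hxkeys : PySem.List.pyGetD xs i 0 ∈ (pvB_minAt num_points xs ys).keys :=
    (hkeys_iff _).mpr ⟨i, hi, rfl⟩
  -- the group minimum mg at x
  obtain ⟨mg, hmg⟩ : ∃ mg, pvGrp xs ys (PySem.List.pyGetD xs i 0)
      (PySem.List.pyRange 0 num_points 1) none = some mg := by
    cases h : pvGrp xs ys (PySem.List.pyGetD xs i 0) (PySem.List.pyRange 0 num_points 1) none with
    | none =>
      obtain ⟨-, hall⟩ := (pvGrp_none_iff xs ys _ _ _).mp h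
      exact absurd rfl (hall i hi)
    | some m => exact ⟨m, rfl⟩
  obtain ⟨hmg1, -, hmg3⟩ := pvGrp_some xs ys _ _ _ _ hmg
  have hmg_att : ∃ j ∈ PySem.List.pyRange 0 num_points 1,
      PySem.List.pyGetD xs j 0 = PySem.List.pyGetD xs i 0 ∧ PySem.List.pyGetD ys j 0 = mg := by
    rcases hmg1 with h | h
    · cases h
    · exact h
  have hgetD : (pvB_minAt num_points xs ys).getD (PySem.List.pyGetD xs i 0) 0 = mg := by
    rw [PySem.Dict.getD_eq_get?_getD, hget, hmg]; rfl
  -- sorted keys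
  have hpair : (PySem.List.sorted (pvB_minAt num_points xs ys).keys (fun k => k) false).Pairwise (· < ·) := by
    rw [pvB_minAt_keys]
    exact PySem.List.sorted_ofList_pairwise_lt _
  have hxk : PySem.List.pyGetD xs i 0 ∈
      PySem.List.sorted (pvB_minAt num_points xs ys).keys (fun k => k) false :=
    (PySem.List.mem_sorted _ _ _ _).mpr hxkeys
  -- before[x]
  have hbefore : (pvB_before (pvB_minAt num_points xs ys)).getD (PySem.List.pyGetD xs i 0) none =
      pvRun (pvB_minAt num_points xs ys) none
        ((PySem.List.sorted (pvB_minAt num_points xs ys).keys (fun k => k) false).filter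
          (fun k => decide (k < PySem.List.pyGetD xs i 0))) := by
    rw [pvB_before_def, PySem.Dict.getD_eq_get?_getD,
      pvBuild_get?_mem (pvB_minAt num_points xs ys) _ _ _ hxk hpair]
    rfl
  -- key values are group minima: attained and lower bounds
  have hkeyval : ∀ k ∈ (pvB_minAt num_points xs ys).keys,
      (∃ j ∈ PySem.List.pyRange 0 num_points 1, PySem.List.pyGetD xs j 0 = k ∧
        PySem.List.pyGetD ys j 0 = (pvB_minAt num_points xs ys).getD k 0) ∧
      (∀ j ∈ PySem.List.pyRange 0 num_points 1, PySem.List.pyGetD xs j 0 = k →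
        (pvB_minAt num_points xs ys).getD k 0 ≤ PySem.List.pyGetD ys j 0) := by
    intro k hk
    obtain ⟨j0, hj0, hj0k⟩ := (hkeys_iff k).mp hk
    obtain ⟨g, hg⟩ : ∃ g, pvGrp xs ys k (PySem.List.pyRange 0 num_points 1) none = some g := by
      cases h : pvGrp xs ys k (PySem.List.pyRange 0 num_points 1) none with
      | none =>
        obtain ⟨-, hall⟩ := (pvGrp_none_iff xs ys _ _ _).mp h
        exact absurd hj0k (hall j0 hj0)
      | some g => exact ⟨g, rfl⟩
    have hgD : (pvB_minAt num_points xs ys).getD k 0 = g := by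
      rw [PySem.Dict.getD_eq_get?_getD, hget, hg]; rfl
    obtain ⟨h1, -, h3⟩ := pvGrp_some xs ys _ _ _ _ hg
    rcases h1 with h1 | h1
    · cases h1
    · exact ⟨by rw [hgD]; exact h1, by rw [hgD]; exact h3⟩
  -- the two domination facts
  have fact2 : (∃ j ∈ PySem.List.pyRange 0 num_points 1,
      PySem.List.pyGetD xs j 0 = PySem.List.pyGetD xs i 0 ∧
      PySem.List.pyGetD ys j 0 < PySem.List.pyGetD ys i 0) ↔ mg < PySem.List.pyGetD ys i 0 := by
    constructor
    · rintro ⟨j, hj, hjx, hjy⟩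
      exact lt_of_le_of_lt (hmg3 j hj hjx) hjy
    · intro h
      obtain ⟨j, hj, hjx, hjy⟩ := hmg_att
      exact ⟨j, hj, hjx, by omega⟩
  have fact1 : (∃ j ∈ PySem.List.pyRange 0 num_points 1,
      PySem.List.pyGetD xs j 0 < PySem.List.pyGetD xs i 0 ∧
      PySem.List.pyGetD ys j 0 ≤ PySem.List.pyGetD ys i 0) ↔
      (∃ r, (pvB_before (pvB_minAt num_points xs ys)).getD (PySem.List.pyGetD xs i 0) none = some r ∧
        r ≤ PySem.List.pyGetD ys i 0) := by
    constructor
    · rintro ⟨j, hj, hjx, hjy⟩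
      have hjkeys : PySem.List.pyGetD xs j 0 ∈ (pvB_minAt num_points xs ys).keys :=
        (hkeys_iff _).mpr ⟨j, hj, rfl⟩
      have hjfilt : PySem.List.pyGetD xs j 0 ∈
          (PySem.List.sorted (pvB_minAt num_points xs ys).keys (fun k => k) false).filter
            (fun k => decide (k < PySem.List.pyGetD xs i 0)) := by
        rw [List.mem_filter]
        exact ⟨(PySem.List.mem_sorted _ _ _ _).mpr hjkeys, by simpa using hjx⟩
      cases hr : (pvB_before (pvB_minAt num_points xs ys)).getD (PySem.List.pyGetD xs i 0) none with
      | none =>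
        rw [hbefore] at hr
        obtain ⟨-, hnil⟩ := (pvRun_none_iff _ _ _).mp hr
        rw [hnil] at hjfilt
        cases hjfilt
      | some r =>
        refine ⟨r, rfl, ?_⟩
        rw [hbefore] at hr
        obtain ⟨-, -, h3⟩ := pvRun_some _ _ _ _ hr
        have := h3 _ hjfilt
        have hjc := (hkeyval _ hjkeys).2 j hj rfl
        omega
    · rintro ⟨r, hr, hry⟩
      rw [hbefore] at hr
      obtain ⟨h1, -, -⟩ := pvRun_some _ _ _ _ hr
      rcases h1 with h1 | ⟨k, hk, hkv⟩
      · cases h1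
      · rw [List.mem_filter] at hk
        obtain ⟨hks, hklt⟩ := hk
        have hkkeys : k ∈ (pvB_minAt num_points xs ys).keys :=
          (PySem.List.mem_sorted _ _ _ _).mp hks
        obtain ⟨⟨j, hj, hjx, hjy⟩, -⟩ := hkeyval k hkkeys
        refine ⟨j, hj, ?_, ?_⟩
        · have : k < PySem.List.pyGetD xs i 0 := by simpa using hklt
          omega
        · omega
  -- assemble the boolean equation
  rw [pvA_domLoop_eq_any, Bool.eq_iff_iff]
  have hany : ((PySem.List.pyRange 0 num_points 1).any (fun j =>
      decide ((PySem.List.pyGetD xs j 0 ≤ PySem.List.pyGetD xs i 0 ∧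
        PySem.List.pyGetD ys j 0 ≤ PySem.List.pyGetD ys i 0) ∧
        (PySem.List.pyGetD xs j 0 < PySem.List.pyGetD xs i 0 ∨
         PySem.List.pyGetD ys j 0 < PySem.List.pyGetD ys i 0))) = true) ↔
      ((∃ j ∈ PySem.List.pyRange 0 num_points 1,
        PySem.List.pyGetD xs j 0 < PySem.List.pyGetD xs i 0 ∧
        PySem.List.pyGetD ys j 0 ≤ PySem.List.pyGetD ys i 0) ∨
       (∃ j ∈ PySem.List.pyRange 0 num_points 1,
        PySem.List.pyGetD xs j 0 = PySem.List.pyGetD xs i 0 ∧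
        PySem.List.pyGetD ys j 0 < PySem.List.pyGetD ys i 0)) := by
    rw [List.any_eq_true]
    constructor
    · rintro ⟨j, hj, hcond⟩
      rw [decide_eq_true_eq] at hcond
      by_cases hlt : PySem.List.pyGetD xs j 0 < PySem.List.pyGetD xs i 0
      · exact Or.inl ⟨j, hj, hlt, hcond.1.2⟩
      · refine Or.inr ⟨j, hj, by omega, by omega⟩
    · rintro (⟨j, hj, h1, h2⟩ | ⟨j, hj, h1, h2⟩) <;>
        exact ⟨j, hj, by rw [decide_eq_true_eq]; omega⟩
  rw [fact1, fact2] at hany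
  cases hr : (pvB_before (pvB_minAt num_points xs ys)).getD (PySem.List.pyGetD xs i 0) none with
  | none =>
    simp only [hr] at hany ⊢
    simp only [Bool.not_eq_true', Bool.true_and, decide_eq_true_eq]
    rw [← Bool.not_eq_true, hany, hgetD]
    constructor
    · intro h
      push_neg at h
      exact h.2
    · intro h
      rintro (⟨r, hr2, -⟩ | h2)
      · cases hr2
      · omega
  | some r =>
    simp only [hr] at hany ⊢
    simp only [Bool.not_eq_true', Bool.and_eq_true, decide_eq_true_eq]
    rw [← Bool.not_eq_true, hany, hgetD]
    constructor
    · intro h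
      push_neg at h
      refine ⟨h.1 r rfl, ?_⟩
      omega
    · rintro ⟨h1, h2⟩ (⟨r', hr', hr'y⟩ | h3)
      · injection hr' with hr''
        omega
      · omega

-- ===== VERDICT (by name: the statement is the Claim_ definition above) =====
theorem find_points_front_pareto_spec : Claim_equal_find_points_front_pareto := by
  intro num_points xs ys _hdom _hpre
  unfold Spec_find_points_front_pareto
  rw [pv_find_A_eq_filter, pv_find_B_eq_filter]
  exact List.filter_congr (fun i hi => pv_pointwise num_points xs ys i hi)
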